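-- pv_equiv track=rewrite | github.com/brucekwak/Programmers_algorithm_practice | lv1_모의고사.py | solution
-- ===== SOURCE A (Python) =====
-- def solution(answers):
--
--     candi_1 = [1, 2, 3, 4, 5] * len(answers)
--     candi_1 = candi_1[:len(answers)]
--     candi_2 = [2, 1, 2, 3, 2, 4, 2, 5] * len(answers)
--     candi_2 = candi_2[:len(answers)]
--     candi_3 = [3, 3, 1, 1, 2, 2, 4, 4, 5, 5] * len(answers)
--     candi_3 = candi_3[:len(answers)]
--
--     score_list = []
--     for candi_i in [candi_1, candi_2, candi_3]:
--         score = [1 for i in range(len(candi_i)) if candi_i[i] == answers[i]]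
--         score_list.append(sum(score))
--
--     max_score = max(score_list)
--     answer = []
--     for ind, score in enumerate(score_list):
--         if score == max_score:
--             answer.append(ind+1)
--     return answer
-- ===== SOURCE B (Python) =====
-- def solution(answers):
--     # Histogram pass: count answers per (position mod 40, value); 40 = lcm(5, 8, 10),
--     # so each pattern is constant on a residue class mod 40.
--     table = {}
--     for i, a in enumerate(answers):
--         key = (i % 40, a)
--         table[key] = table.get(key, 0) + 1
--     scores = []
--     for p in ([1, 2, 3, 4, 5], [2, 1, 2, 3, 2, 4, 2, 5], [3, 3, 1, 1, 2, 2, 4, 4, 5, 5]):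
--         scores.append(sum(table.get((r, p[r % len(p)]), 0) for r in range(40)))
--     m = max(scores)
--     return [i + 1 for i, s in enumerate(scores) if s == m]
-- ===== Notes on version B (the rewrite author's own statement) =====
-- stated objective: alternative
-- what changed: B builds a histogram dict keyed by (position mod 40, answer value) in one pass (40 = lcm of the three pattern lengths), then computes each candidate's score by 40 table lookups instead of comparing every answer against three materialised answer-length pattern lists.
import Mathlib
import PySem

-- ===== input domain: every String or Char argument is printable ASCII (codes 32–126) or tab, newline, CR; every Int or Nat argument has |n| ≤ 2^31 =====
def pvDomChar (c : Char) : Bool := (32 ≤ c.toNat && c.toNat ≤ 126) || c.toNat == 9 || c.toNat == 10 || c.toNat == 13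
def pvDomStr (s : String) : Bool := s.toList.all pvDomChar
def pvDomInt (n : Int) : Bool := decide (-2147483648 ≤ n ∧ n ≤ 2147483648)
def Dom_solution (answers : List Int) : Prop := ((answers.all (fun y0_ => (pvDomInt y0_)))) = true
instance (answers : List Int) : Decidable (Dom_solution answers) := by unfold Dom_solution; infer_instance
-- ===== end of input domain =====

-- B replaces A's three materialised answer-length pattern lists by a histogram dict keyed by
-- (position mod 40, answer value) — 40 = lcm(5,8,10) — and scores each candidate by 40 lookups;
-- objective: alternative algorithm (bounded extra space), not claimed faster.

-- ===== PORT A =====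
-- Python: candi = (p * len(answers))[:len(answers)]  (list repetition then slice-to; exact: [:n] with n = length is take)
def candi (p : List Int) (n : Nat) : List Int := ((List.replicate n p).flatten).take n

-- Python: sum([1 for i in range(len(c)) if c[i] == answers[i]]); both indexings are in range for every i of the range,
-- so pyGetD with default 0 is exact here.
def scoreOf (answers c : List Int) : Int :=
  (((PySem.List.pyRange 0 (c.length : Int) 1).filter
      (fun i => PySem.List.pyGetD c i 0 == PySem.List.pyGetD answers i 0)).map (fun _ => (1 : Int))).sum

def solution (answers : List Int) : List Int :=
  let c1 := candi [1, 2, 3, 4, 5] answers.length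
  let c2 := candi [2, 1, 2, 3, 2, 4, 2, 5] answers.length
  let c3 := candi [3, 3, 1, 1, 2, 2, 4, 4, 5, 5] answers.length
  let scores := [c1, c2, c3].foldl (fun acc c => acc ++ [scoreOf answers c]) []
  -- max(score_list): the list always has 3 elements, so max? is some; .getD 0 is exact
  let maxScore := (PySem.List.max? scores (fun y => y)).getD 0
  (PySem.List.enumerate scores 0).foldl
    (fun acc q => if q.2 == maxScore then acc ++ [q.1 + 1] else acc) []

-- ===== PORT B =====
-- histogram pass: for i, a in enumerate(answers): table[(i % 40, a)] = table.get((i % 40, a), 0) + 1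
def buildTable : List Int → Int → PySem.Dict (Int × Int) Int → PySem.Dict (Int × Int) Int
  | [], _, d => d
  | a :: tl, i, d =>
      buildTable tl (i + 1)
        (d.insert (PySem.Int.mod i 40, a) (d.getD (PySem.Int.mod i 40, a) 0 + 1))

-- sum(table.get((r, p[r % len(p)]), 0) for r in range(40)); the index r % len(p) is always in range,
-- so pyGetD with default 0 is exact.
def tScore (d : PySem.Dict (Int × Int) Int) (p : List Int) : Int :=
  ((PySem.List.pyRange 0 40 1).map
    (fun r => d.getD (r, PySem.List.pyGetD p (PySem.Int.mod r (p.length : Int)) 0) 0)).sum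

def solution_alt (answers : List Int) : List Int :=
  let d := buildTable answers 0 PySem.Dict.empty
  let scores := ([[1, 2, 3, 4, 5], [2, 1, 2, 3, 2, 4, 2, 5], [3, 3, 1, 1, 2, 2, 4, 4, 5, 5]] : List (List Int)).foldl
    (fun acc p => acc ++ [tScore d p]) []
  -- max(scores): always 3 elements, so max? is some; .getD 0 is exact
  let m := (PySem.List.max? scores (fun y => y)).getD 0
  ((PySem.List.enumerate scores 0).filter (fun q => q.2 == m)).map (fun q => q.1 + 1)

-- ===== PRECONDITION & SPEC =====
def Spec_solution (answers : List Int) (out : List Int) : Prop := out = solution_alt answers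
instance (answers : List Int) (out : List Int) : Decidable (Spec_solution answers out) := by unfold Spec_solution; infer_instance

-- ===== CLAIM (what is proved, stated in full; the proofs are below) =====
def Claim_equal_solution : Prop := ∀ (answers : List Int), Dom_solution answers → Spec_solution answers (solution answers)

-- ===== LEMMAS AND PROOFS =====

-- common spec: number of matches of ans against the cyclic pattern p, starting at offset k
def cnt (p : List Int) : List Int → Nat → Int
  | [], _ => 0
  | a :: tl, k => (if a == p.getD (k % p.length) 0 then 1 else 0) + cnt p tl (k + 1)

-- ---------- A side: scoreOf over the materialised pattern equals cnt ----------
theorem flatten_replicate_getD (p : List Int) :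
    ∀ (m i : Nat), i < m * p.length →
      ((List.replicate m p).flatten).getD i 0 = p.getD (i % p.length) 0 := by
  intro m
  induction m with
  | zero => intro i h; omega
  | succ m ih =>
    intro i h
    rw [Nat.succ_mul] at h
    rw [List.replicate_succ, List.flatten_cons]
    by_cases hi : i < p.length
    · rw [List.getD_eq_getElem?_getD, List.getElem?_append_left hi,
        Nat.mod_eq_of_lt hi, ← List.getD_eq_getElem?_getD]
    · rw [not_lt] at hi
      rw [List.getD_eq_getElem?_getD, List.getElem?_append_right hi,
        ← List.getD_eq_getElem?_getD, Nat.mod_eq_sub_mod hi]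
      exact ih (i - p.length) (by omega)

theorem sum_filter_range_eq_cnt (p : List Int) :
    ∀ (ans : List Int) (k : Nat),
      (((List.range ans.length).filter
          (fun j => ans.getD j 0 == p.getD ((k + j) % p.length) 0)).map (fun _ => (1 : Int))).sum
        = cnt p ans k := by
  intro ans
  induction ans with
  | nil => intro k; simp [cnt]
  | cons a tl ih =>
    intro k
    rw [List.length_cons, List.range_succ_eq_map, List.filter_cons]
    have hmap : ((List.range tl.length).map Nat.succ).filter
        (fun j => (a :: tl).getD j 0 == p.getD ((k + j) % p.length) 0)
        = ((List.range tl.length).filter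
            (fun j => tl.getD j 0 == p.getD (((k+1) + j) % p.length) 0)).map Nat.succ := by
      rw [List.filter_map]
      congr 1
      apply List.filter_congr
      intro j _
      have : (a :: tl).getD (Nat.succ j) 0 = tl.getD j 0 := rfl
      simp only [Function.comp, this]
      have : k + Nat.succ j = (k + 1) + j := by omega
      rw [this]
    simp only [List.getD_cons_zero, Nat.add_zero] at *
    rw [hmap]
    by_cases h : (a == p.getD (k % p.length) 0)
    · simp only [h, if_true, List.map_cons, List.sum_cons, List.map_map, Function.comp_def, cnt]
      rw [ih (k+1)]
    · simp only [h, Bool.false_eq_true, if_false, List.map_map, Function.comp_def, cnt]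
      rw [ih (k+1)]
      simp

theorem candi_length (p : List Int) (hp : p ≠ []) (n : Nat) : (candi p n).length = n := by
  have hL : 0 < p.length := List.length_pos_iff.mpr hp
  simp [candi, List.length_flatten, List.map_replicate, List.sum_replicate]
  nlinarith [Nat.le_mul_of_pos_right n hL]

theorem candi_getD (p : List Int) (hp : p ≠ []) (n i : Nat) (h : i < n) :
    (candi p n).getD i 0 = p.getD (i % p.length) 0 := by
  have hL : 0 < p.length := List.length_pos_iff.mpr hp
  have hlt : i < n * p.length := lt_of_lt_of_le h (Nat.le_mul_of_pos_right n hL)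
  rw [candi, List.getD_eq_getElem?_getD, List.getElem?_take_of_lt h, ← List.getD_eq_getElem?_getD]
  exact flatten_replicate_getD p n i hlt

theorem my_beq_comm (a b : Int) : (a == b) = (b == a) := by
  by_cases h : a = b
  · simp [h]
  · simp [h, Ne.symm h]

theorem cnt_eq_score (p : List Int) (hp : p ≠ []) (ans : List Int) :
    scoreOf ans (candi p ans.length) = cnt p ans 0 := by
  rw [scoreOf, candi_length p hp, PySem.List.pyRange_zero_natCast, List.filter_map, List.map_map]
  rw [show ((fun _ => (1:Int)) ∘ (fun j : Nat => (j : Int))) = (fun _ => (1:Int)) from rfl]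
  rw [List.filter_congr (q := fun j => ans.getD j 0 == p.getD ((0 + j) % p.length) 0) ?_]
  · exact sum_filter_range_eq_cnt p ans 0
  · intro j hj
    rw [List.mem_range] at hj
    simp only [Function.comp_def, PySem.List.pyGetD_natCast]
    rw [candi_getD p hp ans.length j hj, Nat.zero_add, my_beq_comm]

-- ---------- B side: the histogram sum equals cnt ----------

-- tScore over List.range instead of pyRange
theorem tScore_eq_range (d : PySem.Dict (Int × Int) Int) (p : List Int) :
    tScore d p = ((List.range 40).map
      (fun r : Nat => d.getD ((r : Int), PySem.List.pyGetD p (PySem.Int.mod (r : Int) (p.length : Int)) 0) 0)).sum := by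
  rw [tScore, show ((40 : Int)) = ((40 : Nat) : Int) from rfl, PySem.List.pyRange_zero_natCast,
    List.map_map]
  rfl

-- inserting one increment at key (r0, a) raises the 40-term sum by the indicator of a matching slot
theorem sum_range_insert (f : Nat → Int) (d : PySem.Dict (Int × Int) Int) (r0 : Nat) (a : Int) :
    ∀ (n : Nat),
    ((List.range n).map (fun r : Nat =>
        (d.insert ((r0 : Int), a) (d.getD ((r0 : Int), a) 0 + 1)).getD ((r : Int), f r) 0)).sum
      = ((List.range n).map (fun r : Nat => d.getD ((r : Int), f r) 0)).sum
        + (if r0 < n ∧ a = f r0 then 1 else 0) := by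
  intro n
  induction n with
  | zero => simp
  | succ n ih =>
    rw [List.range_succ, List.map_append, List.map_append, List.sum_append, List.sum_append, ih]
    simp only [List.map_cons, List.map_nil, List.sum_cons, List.sum_nil]
    by_cases hr : n = r0
    · subst hr
      by_cases ha : a = f n
      · subst ha
        rw [PySem.Dict.getD_insert_self]
        have h1 : ¬ (n < n ∧ f n = f n) := by omega
        have h2 : n < n + 1 ∧ f n = f n := ⟨by omega, rfl⟩
        rw [if_neg h1, if_pos h2]; ring
      · have hne : ((n : Int), f n) ≠ ((n : Int), a) := by
          intro h; exact ha (by injection h with _ h2; exact h2.symm)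
        rw [PySem.Dict.getD_insert_of_ne d _ _ hne]
        have h1 : ¬ (n < n ∧ a = f n) := by tauto
        have h2 : ¬ (n < n + 1 ∧ a = f n) := by
          intro h; exact ha h.2
        rw [if_neg h1, if_neg h2]; ring
    · have hne : ((n : Int), f n) ≠ ((r0 : Int), a) := by
        intro h; injection h with h1 _
        exact hr (by exact_mod_cast h1)
      rw [PySem.Dict.getD_insert_of_ne d _ _ hne]
      have hiff : (r0 < n ∧ a = f r0) ↔ (r0 < n + 1 ∧ a = f r0) := by
        constructor
        · rintro ⟨h1, h2⟩; exact ⟨by omega, h2⟩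
        · rintro ⟨h1, h2⟩
          exact ⟨by omega, h2⟩
      by_cases hc : r0 < n ∧ a = f r0
      · rw [if_pos hc, if_pos (hiff.mp hc)]; ring
      · rw [if_neg hc, if_neg (fun h => hc (hiff.mpr h))]; ring

theorem tScore_build (p : List Int) (hp : p ≠ []) (hdvd : p.length ∣ 40) :
    ∀ (ans : List Int) (k : Nat) (d : PySem.Dict (Int × Int) Int),
      tScore (buildTable ans (k : Int) d) p = tScore d p + cnt p ans k := by
  have hL : 0 < p.length := List.length_pos_iff.mpr hp
  intro ans
  induction ans with
  | nil => intro k d; simp [buildTable, cnt]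
  | cons a tl ih =>
    intro k d
    have hk40 : PySem.Int.mod (k : Int) 40 = ((k % 40 : Nat) : Int) := by
      rw [PySem.Int.mod_eq_emod_of_pos (by omega)]; push_cast; rfl
    have hk1 : (k : Int) + 1 = ((k + 1 : Nat) : Int) := by push_cast; ring
    rw [buildTable, hk40, hk1, ih]
    have hins : tScore (d.insert ((↑(k % 40) : Int), a) (d.getD ((↑(k % 40) : Int), a) 0 + 1)) p
        = tScore d p + (if a == p.getD (k % p.length) 0 then 1 else 0) := by
      have hf : ∀ r : Nat, PySem.List.pyGetD p (PySem.Int.mod (r : Int) (p.length : Int)) 0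
          = p.getD (r % p.length) 0 := by
        intro r
        rw [PySem.Int.mod_eq_emod_of_pos (by exact_mod_cast hL)]
        have : ((r : Int) % (p.length : Int)) = ((r % p.length : Nat) : Int) := by push_cast; rfl
        rw [this, PySem.List.pyGetD_natCast]
      rw [tScore_eq_range, tScore_eq_range,
        sum_range_insert (fun r : Nat => PySem.List.pyGetD p (PySem.Int.mod (r : Int) (p.length : Int)) 0) d (k % 40) a 40]
      congr 1
      have hlt : k % 40 < 40 := Nat.mod_lt _ (by omega)
      have hmm : (k % 40) % p.length = k % p.length := Nat.mod_mod_of_dvd k hdvd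
      rw [hf (k % 40), hmm]
      by_cases h : a = p.getD (k % p.length) 0
      · rw [if_pos ⟨hlt, h⟩, if_pos (by simp only [beq_iff_eq]; exact h)]
      · rw [if_neg (by tauto), if_neg (by simp only [beq_iff_eq]; exact h)]
    rw [hins, cnt]; ring

theorem tScore_empty (p : List Int) : tScore PySem.Dict.empty p = 0 := by
  rw [tScore_eq_range]
  simp [PySem.Dict.getD_empty]

theorem score_alt (p : List Int) (hp : p ≠ []) (hdvd : p.length ∣ 40) (ans : List Int) :
    tScore (buildTable ans 0 PySem.Dict.empty) p = cnt p ans 0 := by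
  have := tScore_build p hp hdvd ans 0 PySem.Dict.empty
  simpa [tScore_empty] using this

-- A's select loop over the same scores list is B's filter-map
theorem select_eq (scores : List Int) (m : Int) :
    (PySem.List.enumerate scores 0).foldl
      (fun acc q => if q.2 == m then acc ++ [q.1 + 1] else acc) [] =
    ((PySem.List.enumerate scores 0).filter (fun q => q.2 == m)).map (fun q => q.1 + 1) := by
  rw [PySem.List.foldl_append_if]
  simp

-- ===== VERDICT (by name: the statement is the Claim_ definition above) =====
theorem solution_spec : Claim_equal_solution := by
  intro answers _
  unfold Spec_solution solution solution_alt
  simp only [List.foldl, List.nil_append]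
  simp only [score_alt [1,2,3,4,5] (by simp) (by decide) answers,
    score_alt [2,1,2,3,2,4,2,5] (by simp) (by decide) answers,
    score_alt [3,3,1,1,2,2,4,4,5,5] (by simp) (by decide) answers,
    cnt_eq_score [1,2,3,4,5] (by simp) answers,
    cnt_eq_score [2,1,2,3,2,4,2,5] (by simp) answers,
    cnt_eq_score [3,3,1,1,2,2,4,4,5,5] (by simp) answers]
  exact select_eq _ _
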